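-- pv_equiv track=rewrite | github.com/Jongminfire/Programmers | Python/Level 2/프렌즈4블록 (구현).py | solution
-- ===== SOURCE A (Python) =====
-- from collections import deque
--
-- def solution(m, n, board):
--     q = deque()
--     score = 0
--
--     # board 행열 바꾸기
--     for i in range(n):
--         temp = deque()
--         for j in range(m):
--             temp.appendleft(board[j][i])
--         q.append(temp)
--
--     # board = list(map(list,zip(*board))) 로 바꿀 수 있음
--
--     while True:
--         # 삭제 저장할 리스트 (중복 값을 받기위해 set로 선언)
--         remove = [set() for _ in range(len(q))]
--         check = False   # 삭제할 값 없음을 검사하기 위한 변수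
--
--         for i in range(len(q)-1):
--             for j in range(len(q[i])-1):
--                 if len(q[i+1]) <= j+1:
--                     break
--
--                 if q[i][j] == q[i][j+1] == q[i+1][j] == q[i+1][j+1]:
--                     remove[i].add(j)
--                     remove[i].add(j+1)
--                     remove[i+1].add(j)
--                     remove[i+1].add(j+1)
--                     check = True
--
--         if not check:
--             break
--
--         # remove 좌표 만큼 점수 증가
--         for i in remove:
--             score += len(i)
--
--         for i, v in enumerate(remove):
--             v = deque(sorted(v))
--             cnt = 0
--
--             # 삭제한만큼 cnt를 증가시켜서 줄어드는 만큼 del 함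
--             while v:
--                 del q[i][v.popleft()-cnt]
--                 cnt += 1
--
--     return score
-- ===== SOURCE B (Python) =====
-- EMPTY = '\0'
--
-- def solution(m, n, board):
--     # columns bottom-cell-first, fixed height m; cleared cells become EMPTY padding on top
--     cols = [[board[m - 1 - r][c] for r in range(m)] for c in range(n)]
--     score = 0
--     while True:
--         marked = [set() for _ in range(n)]
--         for c in range(n - 1):
--             for r in range(m - 1):
--                 v = cols[c][r]
--                 if v != EMPTY and v == cols[c][r + 1] == cols[c + 1][r] == cols[c + 1][r + 1]:
--                     marked[c].update((r, r + 1))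
--                     marked[c + 1].update((r, r + 1))
--         if not any(marked):
--             return score
--         for c in range(n):
--             s = marked[c]
--             survivors = [cols[c][r] for r in range(m) if r not in s]
--             score += m - len(survivors)
--             cols[c] = survivors + [EMPTY] * (m - len(survivors))
-- ===== Notes on version B (the rewrite author's own statement) =====
-- stated objective: simpler
-- what changed: Instead of A's transposed ragged deques with a break-guarded scan and offset-corrected in-place deletions of sorted indices, B keeps a fixed-height column grid padded with a NUL sentinel, marks 2x2 blocks of equal non-sentinel cells over the full rectangle, and applies gravity per column by filtering survivors and restacking sentinel padding.
import Mathlib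
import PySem

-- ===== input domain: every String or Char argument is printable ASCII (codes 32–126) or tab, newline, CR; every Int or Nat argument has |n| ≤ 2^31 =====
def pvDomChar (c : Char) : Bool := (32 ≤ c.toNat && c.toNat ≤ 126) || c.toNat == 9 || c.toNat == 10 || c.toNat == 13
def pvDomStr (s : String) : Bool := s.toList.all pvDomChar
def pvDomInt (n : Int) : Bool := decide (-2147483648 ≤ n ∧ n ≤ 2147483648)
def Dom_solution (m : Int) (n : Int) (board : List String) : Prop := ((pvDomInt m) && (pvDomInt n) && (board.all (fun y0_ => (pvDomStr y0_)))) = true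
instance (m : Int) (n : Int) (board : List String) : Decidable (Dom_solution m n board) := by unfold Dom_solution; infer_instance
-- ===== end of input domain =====

-- B re-implements the game on a fixed-height sentinel-padded column grid (mark 2x2 blocks, filter-based
-- gravity) instead of A's transposed ragged deques with break-guarded scan and offset-corrected deletions;
-- objective: simpler.

-- ===== PORT A =====
-- board[j][i] (Pre_ keeps both indices in range, so the default is never used)
def pvCellA (board : List String) (j i : Nat) : Char :=
  ((board.getD j "").toList).getD i (Char.ofNat 0)

-- temp: for j in range(m): temp.appendleft(board[j][i])
def pvColA (board : List String) (m i : Nat) : List Char :=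
  (List.range m).foldl (fun temp j => pvCellA board j i :: temp) []

-- for i in range(n): q.append(temp)
def pvInitA (board : List String) (m n : Nat) : List (List Char) :=
  (List.range n).foldl (fun q i => q ++ [pvColA board m i]) []

-- remove[i].add(j); remove[i].add(j+1); remove[i+1].add(j); remove[i+1].add(j+1)
def pvAdd4A (rm : List (PySem.Set Nat)) (i j : Nat) : List (PySem.Set Nat) :=
  ((((rm.modify i (fun s => PySem.Set.add s j)).modify i
      (fun s => PySem.Set.add s (j+1))).modify (i+1)
      (fun s => PySem.Set.add s j)).modify (i+1) (fun s => PySem.Set.add s (j+1)))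

-- inner loop: for j in range(len(q[i])-1): if len(q[i+1]) <= j+1: break; if 4 equal: mark
def pvScanJA (q : List (List Char)) (i : Nat) :
    List Nat → (List (PySem.Set Nat) × Bool) → (List (PySem.Set Nat) × Bool)
  | [], st => st
  | j :: js, st =>
    if (q.getD (i+1) []).length ≤ j + 1 then st
    else
      if (q.getD i []).getD j (Char.ofNat 0) = (q.getD i []).getD (j+1) (Char.ofNat 0) ∧
         (q.getD i []).getD j (Char.ofNat 0) = (q.getD (i+1) []).getD j (Char.ofNat 0) ∧
         (q.getD i []).getD j (Char.ofNat 0) = (q.getD (i+1) []).getD (j+1) (Char.ofNat 0)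
      then pvScanJA q i js (pvAdd4A st.1 i j, true)
      else pvScanJA q i js st

-- outer loop: for i in range(len(q)-1)
def pvScanIA (q : List (List Char)) :
    List Nat → (List (PySem.Set Nat) × Bool) → (List (PySem.Set Nat) × Bool)
  | [], st => st
  | i :: is, st => pvScanIA q is (pvScanJA q i (List.range ((q.getD i []).length - 1)) st)

-- while v: del q[i][v.popleft()-cnt]; cnt += 1   (indices are in range wherever the Python runs)
def pvDelColA : List Char → List Nat → Nat → List Char
  | col, [], _ => col
  | col, x :: xs, cnt => pvDelColA (col.eraseIdx (x - cnt)) xs (cnt + 1)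

-- for i, v in enumerate(remove): ...
def pvRemoveA : List (List Char) → Nat → List (PySem.Set Nat) → List (List Char)
  | q, _, [] => q
  | q, i, v :: vs =>
      pvRemoveA (q.modify i (fun col => pvDelColA col (PySem.List.sorted v (fun x => x) false) 0))
        (i+1) vs

-- while True: ... (fuel m*n+1 strictly dominates the number of rounds: every round that
-- does not break removes at least one cell)
def pvLoopA (q : List (List Char)) (score : Int) : Nat → Int
  | 0 => score
  | fuel + 1 =>
    let st := pvScanIA q (List.range (q.length - 1)) (List.replicate q.length PySem.Set.empty, false)
    if st.2 = false then score
    else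
      pvLoopA (pvRemoveA q 0 st.1) (st.1.foldl (fun s v => s + (v.length : Int)) score) fuel

def solution (m : Int) (n : Int) (board : List String) : Int :=
  pvLoopA (pvInitA board m.toNat n.toNat) 0 (m.toNat * n.toNat + 1)

-- ===== PORT B =====
def pvEmptyB : Char := Char.ofNat 0

-- cols = [[board[m-1-r][c] for r in range(m)] for c in range(n)]
def pvInitB (board : List String) (m n : Nat) : List (List Char) :=
  (List.range n).map (fun c =>
    (List.range m).map (fun r => ((board.getD (m - 1 - r) "").toList).getD c pvEmptyB))

-- marked[c].update((r, r+1)); marked[c+1].update((r, r+1))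
def pvMark4B (mk : List (PySem.Set Nat)) (c r : Nat) : List (PySem.Set Nat) :=
  (mk.modify c (fun s => PySem.Set.update s [r, r+1])).modify (c+1)
    (fun s => PySem.Set.update s [r, r+1])

-- the double marking scan over the full n x m rectangle
def pvMarkB (cols : List (List Char)) (m n : Nat) : List (PySem.Set Nat) :=
  (List.range (n - 1)).foldl (fun mk c =>
    (List.range (m - 1)).foldl (fun mk r =>
      if (cols.getD c []).getD r pvEmptyB ≠ pvEmptyB ∧
         (cols.getD c []).getD r pvEmptyB = (cols.getD c []).getD (r+1) pvEmptyB ∧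
         (cols.getD c []).getD r pvEmptyB = (cols.getD (c+1) []).getD r pvEmptyB ∧
         (cols.getD c []).getD r pvEmptyB = (cols.getD (c+1) []).getD (r+1) pvEmptyB
      then pvMark4B mk c r else mk) mk)
    (List.replicate n PySem.Set.empty)

-- survivors = [cols[c][r] for r in range(m) if r not in s]
def pvSurvB (col : List Char) (s : PySem.Set Nat) (m : Nat) : List Char :=
  (List.range m).foldl (fun acc r => if r ∈ s then acc else acc ++ [col.getD r pvEmptyB]) []

-- the gravity-and-score loop: for c in range(n): ...
def pvGravB (marked : List (PySem.Set Nat)) (m : Nat) :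
    List Nat → (List (List Char) × Int) → (List (List Char) × Int)
  | [], st => st
  | c :: cs, st =>
    let surv := pvSurvB (st.1.getD c []) (marked.getD c []) m
    pvGravB marked m cs
      (st.1.set c (surv ++ List.replicate (m - surv.length) pvEmptyB),
       st.2 + ((m : Int) - (surv.length : Int)))

def pvLoopB (m n : Nat) : List (List Char) → Int → Nat → Int
  | _, score, 0 => score
  | cols, score, fuel + 1 =>
    let marked := pvMarkB cols m n
    if marked.any (fun s => !s.isEmpty) = false then score
    else
      let st := pvGravB marked m (List.range n) (cols, score)
      pvLoopB m n st.1 st.2 fuel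

def solution_alt (m : Int) (n : Int) (board : List String) : Int :=
  pvLoopB m.toNat n.toNat (pvInitB board m.toNat n.toNat) 0 (m.toNat * n.toNat + 1)

-- ===== PRECONDITION & SPEC =====
-- Pre_ excludes exactly the inputs where the Python raises IndexError while reading the m x n
-- top-left rectangle of board (too few rows, or a row among the first m shorter than n).
def Pre_solution (m : Int) (n : Int) (board : List String) : Prop :=
  (0 < m ∧ 0 < n) → (m ≤ (board.length : Int) ∧
    ∀ s ∈ board.take m.toNat, n ≤ (s.toList.length : Int))
instance (m : Int) (n : Int) (board : List String) : Decidable (Pre_solution m n board) := by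
  unfold Pre_solution; infer_instance

def pvWitness_solution : Int × Int × List String := (2, 3, ["AAB", "AAB"])

def Spec_solution (m : Int) (n : Int) (board : List String) (out : Int) : Prop := out = solution_alt m n board
instance (m : Int) (n : Int) (board : List String) (out : Int) : Decidable (Spec_solution m n board out) := by unfold Spec_solution; infer_instance

-- ===== CLAIM (what is proved, stated in full; the proofs are below) =====
def Claim_equal_solution : Prop := ∀ (m : Int) (n : Int) (board : List String), Dom_solution m n board → Pre_solution m n board → Spec_solution m n board (solution m n board)

-- ===== LEMMAS AND PROOFS =====


-- ---- proof-side notions ----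
def pvPad (m : Nat) (col : List Char) : List Char :=
  col ++ List.replicate (m - col.length) pvEmptyB

def pvInv (m n : Nat) (q : List (List Char)) : Prop :=
  q.length = n ∧ ∀ col ∈ q, col.length ≤ m ∧ pvEmptyB ∉ col
-- ---- basic list/pad lemmas ----
theorem pvGetD_out {α : Type} (l : List α) (r : Nat) (d : α) (h : l.length ≤ r) :
    l.getD r d = d := by
  simp [List.getD_eq_getElem?_getD, List.getElem?_eq_none (by omega)]

theorem pvPad_getD (m : Nat) (col : List Char) (r : Nat) :
    (pvPad m col).getD r pvEmptyB = col.getD r pvEmptyB := by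
  by_cases h : r < col.length
  · simp [pvPad, List.getD_eq_getElem?_getD, List.getElem?_append_left h]
  · rw [pvGetD_out col r _ (by omega)]
    by_cases h2 : r < (pvPad m col).length
    · have : r - col.length < m - col.length := by
        simp [pvPad] at h2; omega
      simp [pvPad, List.getD_eq_getElem?_getD, List.getElem?_append_right (by omega : col.length ≤ r),
        List.getElem?_replicate, this]
    · rw [pvGetD_out _ r _ (by omega)]

theorem pvGetD_map_pad (m : Nat) (q : List (List Char)) (c : Nat) (h : c < q.length) :
    (q.map (pvPad m)).getD c [] = pvPad m (q.getD c []) := by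
  simp [List.getD_eq_getElem?_getD, List.getElem?_map, List.getElem?_eq_getElem h]

theorem pvGetD_mem {α : Type} (l : List α) (r : Nat) (d : α) (h : r < l.length) :
    l.getD r d ∈ l := by
  simp [List.getD_eq_getElem?_getD, List.getElem?_eq_getElem h]

theorem pvModify_getD {α : Type} (l : List α) (i : Nat) (f : α → α) (k : Nat) (d : α) :
    (l.modify i f).getD k d = if k = i ∧ i < l.length then f (l.getD k d) else l.getD k d := by
  by_cases hk : k < l.length
  · simp only [List.getD_eq_getElem?_getD, List.getElem?_modify]
    by_cases h : i = k
    · subst h; simp [List.getElem?_eq_getElem hk, hk]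
    · simp [List.getElem?_eq_getElem hk, h]
      intro h1 h2; omega
  · rw [pvGetD_out _ k d (by simpa using (by omega : l.length ≤ k))]
    rw [pvGetD_out _ k d (by omega)]
    split <;> · first | rfl | (rename_i hc; omega)

theorem pvModify_modify_self {α : Type} (l : List α) (i : Nat) (f g : α → α) :
    (l.modify i f).modify i g = l.modify i (fun x => g (f x)) := by
  apply List.ext_getElem?
  intro j
  simp [List.getElem?_modify]
  cases l[j]? <;> simp <;> split <;> simp

-- ---- Set lemmas ----
theorem pvSetAdd_ne_nil (s : PySem.Set Nat) (x : Nat) : PySem.Set.add s x ≠ [] := by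
  rw [PySem.Set.add_eq_ite]
  split
  · rename_i h; intro hc; subst hc; simp at h
  · simp

theorem pvUpdate_pair (s : PySem.Set Nat) (j k : Nat) :
    PySem.Set.update s [j, k] = PySem.Set.add (PySem.Set.add s j) k := rfl

theorem pvAdd4_eq_mark4 (R : List (PySem.Set Nat)) (i j : Nat) :
    pvAdd4A R i j = pvMark4B R i j := by
  unfold pvAdd4A pvMark4B
  rw [pvModify_modify_self ((R.modify i fun s => PySem.Set.add s j).modify i
    fun s => PySem.Set.add s (j+1)) (i+1)]
  rw [pvModify_modify_self R i]
  rfl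

-- ---- scan conditions (proof-side names for the two ports' branch conditions) ----
def pvCondA (q : List (List Char)) (i j : Nat) : Prop :=
  (q.getD i []).getD j (Char.ofNat 0) = (q.getD i []).getD (j+1) (Char.ofNat 0) ∧
  (q.getD i []).getD j (Char.ofNat 0) = (q.getD (i+1) []).getD j (Char.ofNat 0) ∧
  (q.getD i []).getD j (Char.ofNat 0) = (q.getD (i+1) []).getD (j+1) (Char.ofNat 0)

def pvCondB (cols : List (List Char)) (c r : Nat) : Prop :=
  (cols.getD c []).getD r pvEmptyB ≠ pvEmptyB ∧
  (cols.getD c []).getD r pvEmptyB = (cols.getD c []).getD (r+1) pvEmptyB ∧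
  (cols.getD c []).getD r pvEmptyB = (cols.getD (c+1) []).getD r pvEmptyB ∧
  (cols.getD c []).getD r pvEmptyB = (cols.getD (c+1) []).getD (r+1) pvEmptyB

theorem pvEmptyB_eq : pvEmptyB = Char.ofNat 0 := rfl

-- flagged B-style step (same state shape as A's scan state)
def pvStepF (cols : List (List Char)) (c : Nat) (st : List (PySem.Set Nat) × Bool) (r : Nat) :
    List (PySem.Set Nat) × Bool :=
  if (cols.getD c []).getD r pvEmptyB ≠ pvEmptyB ∧
     (cols.getD c []).getD r pvEmptyB = (cols.getD c []).getD (r+1) pvEmptyB ∧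
     (cols.getD c []).getD r pvEmptyB = (cols.getD (c+1) []).getD r pvEmptyB ∧
     (cols.getD c []).getD r pvEmptyB = (cols.getD (c+1) []).getD (r+1) pvEmptyB
  then (pvMark4B st.1 c r, true) else st

-- unflagged B step (exactly the body of pvMarkB's inner fold)
def pvStepB1 (cols : List (List Char)) (c : Nat) (mk : List (PySem.Set Nat)) (r : Nat) :
    List (PySem.Set Nat) :=
  if (cols.getD c []).getD r pvEmptyB ≠ pvEmptyB ∧
     (cols.getD c []).getD r pvEmptyB = (cols.getD c []).getD (r+1) pvEmptyB ∧
     (cols.getD c []).getD r pvEmptyB = (cols.getD (c+1) []).getD r pvEmptyB ∧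
     (cols.getD c []).getD r pvEmptyB = (cols.getD (c+1) []).getD (r+1) pvEmptyB
  then pvMark4B mk c r else mk

-- A-style step without the break guard
def pvStepAF (q : List (List Char)) (i : Nat) (st : List (PySem.Set Nat) × Bool) (j : Nat) :
    List (PySem.Set Nat) × Bool :=
  if (q.getD i []).getD j (Char.ofNat 0) = (q.getD i []).getD (j+1) (Char.ofNat 0) ∧
     (q.getD i []).getD j (Char.ofNat 0) = (q.getD (i+1) []).getD j (Char.ofNat 0) ∧
     (q.getD i []).getD j (Char.ofNat 0) = (q.getD (i+1) []).getD (j+1) (Char.ofNat 0)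
  then (pvAdd4A st.1 i j, true) else st

theorem pvMarkB_eq_fold (cols : List (List Char)) (m n : Nat) :
    pvMarkB cols m n = (List.range (n-1)).foldl
      (fun mk c => (List.range (m-1)).foldl (pvStepB1 cols c) mk)
      (List.replicate n PySem.Set.empty) := rfl

theorem pvStepF_pos {cols : List (List Char)} {c r : Nat} (st : List (PySem.Set Nat) × Bool)
    (h : pvCondB cols c r) : pvStepF cols c st r = (pvMark4B st.1 c r, true) := by
  unfold pvCondB at h; unfold pvStepF; rw [if_pos h]

theorem pvStepF_neg {cols : List (List Char)} {c r : Nat} (st : List (PySem.Set Nat) × Bool)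
    (h : ¬ pvCondB cols c r) : pvStepF cols c st r = st := by
  unfold pvCondB at h; unfold pvStepF; rw [if_neg h]

theorem pvStepB1_pos {cols : List (List Char)} {c r : Nat} (mk : List (PySem.Set Nat))
    (h : pvCondB cols c r) : pvStepB1 cols c mk r = pvMark4B mk c r := by
  unfold pvCondB at h; unfold pvStepB1; rw [if_pos h]

theorem pvStepB1_neg {cols : List (List Char)} {c r : Nat} (mk : List (PySem.Set Nat))
    (h : ¬ pvCondB cols c r) : pvStepB1 cols c mk r = mk := by
  unfold pvCondB at h; unfold pvStepB1; rw [if_neg h]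

theorem pvStepAF_pos {q : List (List Char)} {i j : Nat} (st : List (PySem.Set Nat) × Bool)
    (h : pvCondA q i j) : pvStepAF q i st j = (pvAdd4A st.1 i j, true) := by
  unfold pvCondA at h; unfold pvStepAF; rw [if_pos h]

theorem pvStepAF_neg {q : List (List Char)} {i j : Nat} (st : List (PySem.Set Nat) × Bool)
    (h : ¬ pvCondA q i j) : pvStepAF q i st j = st := by
  unfold pvCondA at h; unfold pvStepAF; rw [if_neg h]

theorem pvCondB_iff (m : Nat) (q : List (List Char)) (c r : Nat) (hc : c + 1 < q.length) :
    pvCondB (q.map (pvPad m)) c r ↔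
      ((q.getD c []).getD r pvEmptyB ≠ pvEmptyB ∧
       (q.getD c []).getD r pvEmptyB = (q.getD c []).getD (r+1) pvEmptyB ∧
       (q.getD c []).getD r pvEmptyB = (q.getD (c+1) []).getD r pvEmptyB ∧
       (q.getD c []).getD r pvEmptyB = (q.getD (c+1) []).getD (r+1) pvEmptyB) := by
  unfold pvCondB
  rw [pvGetD_map_pad m q c (by omega), pvGetD_map_pad m q (c+1) hc,
    pvPad_getD, pvPad_getD, pvPad_getD, pvPad_getD]

theorem pvCondB_false (m : Nat) (q : List (List Char)) (c r : Nat) (hc : c + 1 < q.length)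
    (h : (q.getD c []).length ≤ r + 1 ∨ (q.getD (c+1) []).length ≤ r + 1) :
    ¬ pvCondB (q.map (pvPad m)) c r := by
  rw [pvCondB_iff m q c r hc]
  rintro ⟨hv, h1, h2, h3⟩
  rcases h with h | h
  · rw [pvGetD_out _ _ _ h] at h1; exact hv h1
  · rw [pvGetD_out _ _ _ h] at h3; exact hv h3

theorem pvCondAB (m : Nat) (q : List (List Char)) (c r : Nat) (hc : c + 1 < q.length)
    (hE : pvEmptyB ∉ q.getD c [])
    (h1 : r + 1 < (q.getD c []).length) :
    (pvCondB (q.map (pvPad m)) c r ↔ pvCondA q c r) := by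
  rw [pvCondB_iff m q c r hc]
  unfold pvCondA
  rw [← pvEmptyB_eq]
  constructor
  · rintro ⟨_, a, b, c⟩; exact ⟨a, b, c⟩
  · rintro ⟨a, b, c⟩
    refine ⟨fun hv => ?_, a, b, c⟩
    exact hE (hv ▸ pvGetD_mem _ r pvEmptyB (by omega))

-- ---- generic fold helpers ----
theorem pvFoldl_id {α β : Type} (l : List α) (f : β → α → β) (st : β)
    (h : ∀ st x, x ∈ l → f st x = st) : l.foldl f st = st := by
  induction l generalizing st with
  | nil => rfl
  | cons x xs ih =>
    rw [List.foldl_cons, h st x (by simp)]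
    exact ih st (fun st y hy => h st y (by simp [hy]))

theorem pvFoldl_inv {α β : Type} (l : List α) (f : β → α → β) (P : β → Prop)
    (h : ∀ st x, x ∈ l → P st → P (f st x)) (st : β) (hst : P st) : P (l.foldl f st) := by
  induction l generalizing st with
  | nil => exact hst
  | cons x xs ih =>
    exact ih (fun st y hy => h st y (by simp [hy])) _ (h st x (by simp) hst)

theorem pvFoldF_fst (cols : List (List Char)) (c : Nat) (l : List Nat)
    (st : List (PySem.Set Nat) × Bool) :
    (l.foldl (pvStepF cols c) st).1 = l.foldl (pvStepB1 cols c) st.1 := by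
  induction l generalizing st with
  | nil => rfl
  | cons x xs ih =>
    rw [List.foldl_cons, List.foldl_cons, ih]
    by_cases h : pvCondB cols c x
    · rw [pvStepF_pos st h, pvStepB1_pos st.1 h]
    · rw [pvStepF_neg st h, pvStepB1_neg st.1 h]

-- ---- the inner scan: A's break-guarded loop over one column pair ----
theorem pvScanJA_cons (q : List (List Char)) (i j : Nat) (js : List Nat)
    (st : List (PySem.Set Nat) × Bool) (h : ¬ (q.getD (i+1) []).length ≤ j + 1) :
    pvScanJA q i (j :: js) st = pvScanJA q i js (pvStepAF q i st j) := by
  by_cases hc : pvCondA q i j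
  · have hc' := hc; unfold pvCondA at hc'
    rw [pvStepAF_pos st hc]
    show (if (q.getD (i+1) []).length ≤ j + 1 then st else _) = _
    rw [if_neg h, if_pos hc']
  · have hc' := hc; unfold pvCondA at hc'
    rw [pvStepAF_neg st hc]
    show (if (q.getD (i+1) []).length ≤ j + 1 then st else _) = _
    rw [if_neg h, if_neg hc']

theorem pvScanJA_break (q : List (List Char)) (i j : Nat) (js : List Nat)
    (st : List (PySem.Set Nat) × Bool) (h : (q.getD (i+1) []).length ≤ j + 1) :
    pvScanJA q i (j :: js) st = st := by
  show (if (q.getD (i+1) []).length ≤ j + 1 then st else _) = _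
  rw [if_pos h]

theorem pvScanJA_no_break (q : List (List Char)) (i : Nat) (js rest : List Nat)
    (st : List (PySem.Set Nat) × Bool)
    (hjs : ∀ j ∈ js, j + 1 < (q.getD (i+1) []).length) :
    pvScanJA q i (js ++ rest) st = pvScanJA q i rest (js.foldl (pvStepAF q i) st) := by
  induction js generalizing st with
  | nil => rfl
  | cons j js ih =>
    rw [List.cons_append, pvScanJA_cons q i j _ st (by have := hjs j (by simp); omega)]
    exact ih _ (fun x hx => hjs x (by simp [hx]))

-- ---- A's inner loop equals B's full-width inner loop (flagged form) ----
theorem pvScanJA_eq (m : Nat) (q : List (List Char)) (i : Nat)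
    (hq : ∀ col ∈ q, col.length ≤ m ∧ pvEmptyB ∉ col)
    (hi : i + 1 < q.length) (st : List (PySem.Set Nat) × Bool) :
    pvScanJA q i (List.range ((q.getD i []).length - 1)) st =
      (List.range (m-1)).foldl (pvStepF (q.map (pvPad m)) i) st := by
  set Li := (q.getD i []).length with hLi
  set Li1 := (q.getD (i+1) []).length with hLi1
  have hcoli : q.getD i [] ∈ q := pvGetD_mem q i [] (by omega)
  have hcoli1 : q.getD (i+1) [] ∈ q := pvGetD_mem q (i+1) [] hi
  have hLim : Li ≤ m := (hq _ hcoli).1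
  have hLi1m : Li1 ≤ m := (hq _ hcoli1).1
  have hEi : pvEmptyB ∉ q.getD i [] := (hq _ hcoli).2
  set K := min (Li - 1) (Li1 - 1) with hK
  -- A side reduces to a plain fold over range K
  have hA : pvScanJA q i (List.range (Li - 1)) st = (List.range K).foldl (pvStepAF q i) st := by
    have hsplit : List.range (Li - 1) = List.range K ++ List.range' K ((Li - 1) - K) := by
      rw [List.range_eq_range', List.range_eq_range']
      rw [show (List.range' K ((Li-1) - K) : List Nat) = List.range' (0 + 1 * K) ((Li-1) - K) by simp]
      rw [List.range'_append]
      congr 1; omega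
    rw [hsplit, pvScanJA_no_break q i _ _ st (fun j hj => by
      have := List.mem_range.mp hj; omega)]
    rcases Nat.eq_zero_or_pos ((Li - 1) - K) with h0 | hpos
    · rw [h0]; rfl
    · have : List.range' K ((Li - 1) - K) = K :: List.range' (K+1) ((Li - 1) - K - 1) := by
        obtain ⟨t, ht⟩ : ∃ t, (Li - 1) - K = t + 1 := ⟨(Li - 1) - K - 1, by omega⟩
        rw [ht, List.range'_succ]
        norm_num
      rw [this, pvScanJA_break q i K _ _ (by omega)]
  rw [hA]
  -- B side: the tail beyond K is a no-op
  have hsplitB : List.range (m - 1) = List.range K ++ List.range' K ((m - 1) - K) := by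
    rw [List.range_eq_range', List.range_eq_range']
    rw [show (List.range' K ((m-1) - K) : List Nat) = List.range' (0 + 1 * K) ((m-1) - K) by simp]
    rw [List.range'_append]
    congr 1; omega
  rw [hsplitB, List.foldl_append]
  rw [pvFoldl_id (List.range' K ((m-1) - K)) (pvStepF (q.map (pvPad m)) i) _ (fun st j hj => by
    have hKj : K ≤ j := by
      rcases List.mem_range'.mp hj with ⟨t, ht, rfl⟩; omega
    exact pvStepF_neg st (pvCondB_false m q i j hi (by omega)))]
  -- on range K the two steps agree
  apply PySem.List.foldl_congr_mem
  intro st' j hj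
  have hjK := List.mem_range.mp hj
  by_cases hc : pvCondA q i j
  · rw [pvStepAF_pos st' hc, pvStepF_pos st' ((pvCondAB m q i j hi hEi (by omega)).mpr hc)]
    rw [pvAdd4_eq_mark4]
  · rw [pvStepAF_neg st' hc, pvStepF_neg st'
      (fun hb => hc ((pvCondAB m q i j hi hEi (by omega)).mp hb))]

-- ---- outer scan ----
theorem pvScanIA_eq (m : Nat) (q : List (List Char))
    (hq : ∀ col ∈ q, col.length ≤ m ∧ pvEmptyB ∉ col) :
    ∀ (is : List Nat) (st : List (PySem.Set Nat) × Bool), (∀ i ∈ is, i + 1 < q.length) →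
    pvScanIA q is st =
      is.foldl (fun st i => (List.range (m-1)).foldl (pvStepF (q.map (pvPad m)) i) st) st := by
  intro is
  induction is with
  | nil => intro st _; rfl
  | cons i is ih =>
    intro st hmem
    show pvScanIA q is _ = _
    rw [pvScanJA_eq m q i hq (hmem i (by simp)) st]
    rw [ih _ (fun x hx => hmem x (by simp [hx]))]
    rfl

theorem pvFold2_fst (cols : List (List Char)) (m : Nat) (is : List Nat)
    (st : List (PySem.Set Nat) × Bool) :
    (is.foldl (fun st i => (List.range (m-1)).foldl (pvStepF cols i) st) st).1 =
      is.foldl (fun mk i => (List.range (m-1)).foldl (pvStepB1 cols i) mk) st.1 := by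
  induction is generalizing st with
  | nil => rfl
  | cons i is ih =>
    rw [List.foldl_cons, List.foldl_cons, ih, pvFoldF_fst]

-- value of pvMark4B at an index
theorem pvMark4B_getD (R : List (PySem.Set Nat)) (c r k : Nat) (hk : k < R.length) :
    (pvMark4B R c r).getD k [] =
      if k = c ∨ k = c + 1 then PySem.Set.update (R.getD k []) [r, r+1] else R.getD k [] := by
  unfold pvMark4B
  rw [pvModify_getD, pvModify_getD]
  rw [List.length_modify]
  by_cases h1 : k = c + 1
  · rw [if_pos ⟨h1, by omega⟩, if_neg (by omega), if_pos (by omega)]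
  · rw [if_neg (by simp [h1])]
    by_cases h2 : k = c
    · rw [if_pos ⟨h2, by omega⟩, if_pos (by omega)]
    · rw [if_neg (by simp [h2]), if_neg (by simp [h1, h2])]

theorem pvMark4B_length (R : List (PySem.Set Nat)) (c r : Nat) :
    (pvMark4B R c r).length = R.length := by
  unfold pvMark4B; rw [List.length_modify, List.length_modify]

-- the double-fold scan state (flagged)
def pvScanF (cols : List (List Char)) (m n : Nat) (st : List (PySem.Set Nat) × Bool) :
    List (PySem.Set Nat) × Bool :=
  (List.range (n-1)).foldl (fun st i => (List.range (m-1)).foldl (pvStepF cols i) st) st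

-- flag = "some set nonempty", plus shape invariants, for runs from the initial state
theorem pvScanF_inv (m n : Nat) (q : List (List Char)) (hn : q.length = n) :
    (fun (st : List (PySem.Set Nat) × Bool) =>
      st.1.length = n ∧
      (st.2 = false → st.1 = List.replicate n PySem.Set.empty) ∧
      (st.2 = true → ∃ k, k < n ∧ st.1.getD k [] ≠ []) ∧
      (∀ c, (∀ x ∈ st.1.getD c [], x < (q.getD c []).length) ∧ (st.1.getD c []).Nodup))
    (pvScanF (q.map (pvPad m)) m n (List.replicate n PySem.Set.empty, false)) := by
  set cols := q.map (pvPad m) with hcols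
  unfold pvScanF
  apply pvFoldl_inv _ _
    (fun (st : List (PySem.Set Nat) × Bool) =>
      st.1.length = n ∧
      (st.2 = false → st.1 = List.replicate n PySem.Set.empty) ∧
      (st.2 = true → ∃ k, k < n ∧ st.1.getD k [] ≠ []) ∧
      (∀ c, (∀ x ∈ st.1.getD c [], x < (q.getD c []).length) ∧ (st.1.getD c []).Nodup))
    ?step _ ?init
  case init =>
    refine ⟨by simp, fun _ => rfl, by simp, fun c => ⟨?_, ?_⟩⟩
    · intro x hx
      by_cases hc : c < n
      · simp [List.getD_eq_getElem?_getD, List.getElem?_replicate, hc, PySem.Set.empty] at hx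
      · rw [pvGetD_out _ _ _ (by simp; omega)] at hx; simp at hx
    · by_cases hc : c < n
      · simp [List.getD_eq_getElem?_getD, List.getElem?_replicate, hc, PySem.Set.empty]
      · rw [pvGetD_out _ _ _ (by simp; omega)]; simp
  case step =>
    intro st i hi hP
    have hi' : i + 1 < n := by have := List.mem_range.mp hi; omega
    refine pvFoldl_inv _ _
      (fun (st : List (PySem.Set Nat) × Bool) =>
        st.1.length = n ∧
        (st.2 = false → st.1 = List.replicate n PySem.Set.empty) ∧
        (st.2 = true → ∃ k, k < n ∧ st.1.getD k [] ≠ []) ∧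
        (∀ c, (∀ x ∈ st.1.getD c [], x < (q.getD c []).length) ∧ (st.1.getD c []).Nodup))
      ?_ st hP
    intro st r _ hP
    by_cases hc : pvCondB cols i r
    · rw [pvStepF_pos st hc]
      obtain ⟨hlen, _, _, hbnd⟩ := hP
      have hblt : r + 1 < (q.getD i []).length ∧ r + 1 < (q.getD (i+1) []).length := by
        by_contra hcon
        exact pvCondB_false m q i r (by omega) (by omega) hc
      refine ⟨by simp [pvMark4B_length, hlen], ?_, ?_, ?_⟩
      · intro hfalse; simp at hfalse
      · intro _
        refine ⟨i, by omega, ?_⟩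
        rw [pvMark4B_getD _ _ _ _ (by omega), if_pos (Or.inl rfl), pvUpdate_pair]
        exact pvSetAdd_ne_nil _ _
      · intro c
        by_cases hck : c < n
        · rw [pvMark4B_getD _ _ _ _ (by omega)]
          split
          · rename_i hor
            constructor
            · intro x hx
              rw [pvUpdate_pair] at hx
              rcases (PySem.Set.mem_add _ _ _).mp hx with hx | hx
              · rcases (PySem.Set.mem_add _ _ _).mp hx with hx | hx
                · exact (hbnd c).1 x hx
                · subst hx; rcases hor with h | h <;> (subst h; omega)
              · subst hx; rcases hor with h | h <;> (subst h; omega)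
            · exact PySem.Set.nodup_update _ _ ((hbnd c).2)
          · exact hbnd c
        · have : (pvMark4B st.1 i r).getD c [] = [] := by
            rw [pvGetD_out _ _ _ (by rw [pvMark4B_length]; omega)]
          rw [this]
          simp
    · rw [pvStepF_neg st hc]; exact hP

-- ---- survivors / gravity ----
theorem pvMap_getD_range (col : List Char) :
    (List.range col.length).map (fun r => col.getD r pvEmptyB) = col := by
  apply List.ext_getElem
  · simp
  · intro i h1 h2
    simp [List.getD_eq_getElem?_getD, List.getElem?_eq_getElem (by simpa using h2)]

def pvFilterOut (col : List Char) (s : PySem.Set Nat) : List Char :=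
  ((List.range col.length).filter (fun r => decide (¬ r ∈ s))).map (fun r => col.getD r pvEmptyB)

theorem pvSurvB_eq_filter (col : List Char) (s : PySem.Set Nat) (m : Nat) :
    pvSurvB col s m =
      ((List.range m).filter (fun r => decide (¬ r ∈ s))).map (fun r => col.getD r pvEmptyB) := by
  unfold pvSurvB
  have gen : ∀ (l : List Nat) (acc : List Char),
      l.foldl (fun acc r => if r ∈ s then acc else acc ++ [col.getD r pvEmptyB]) acc =
        acc ++ (l.filter (fun r => decide (¬ r ∈ s))).map (fun r => col.getD r pvEmptyB) := by
    intro l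
    induction l with
    | nil => intro acc; simp
    | cons x xs ih =>
      intro acc
      rw [List.foldl_cons]
      by_cases hx : x ∈ s
      · rw [if_pos hx, ih, List.filter_cons, if_neg (by simp [hx])]
      · rw [if_neg hx, ih, List.filter_cons, if_pos (by simp [hx])]
        simp
  rw [gen]
  rfl

theorem pvEraseIdx_getD (col : List Char) (p r : Nat) (hp : p < col.length) :
    (col.eraseIdx p).getD r pvEmptyB =
      if r < p then col.getD r pvEmptyB else col.getD (r+1) pvEmptyB := by
  rw [List.getD_eq_getElem?_getD, List.getElem?_eraseIdx]
  by_cases h : r < p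
  · rw [if_pos h, if_pos h, List.getD_eq_getElem?_getD]
  · rw [if_neg h, if_neg h, List.getD_eq_getElem?_getD]

theorem pvDelColA_eq (vs : List Nat) : ∀ (col : List Char) (cnt : Nat),
    vs.Pairwise (· < ·) → (∀ x ∈ vs, cnt ≤ x ∧ x - cnt < col.length) →
    pvDelColA col vs cnt =
      ((List.range col.length).filter (fun r => decide (¬ (r + cnt) ∈ vs))).map
        (fun r => col.getD r pvEmptyB) := by
  induction vs with
  | nil =>
    intro col cnt _ _
    show col = _
    rw [List.filter_eq_self.mpr (by simp)]
    exact (pvMap_getD_range col).symm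
  | cons v vs ih =>
    intro col cnt hpw hbnd
    obtain ⟨hvc, hvL⟩ := hbnd v (by simp)
    have hvlt : ∀ x ∈ vs, v < x := fun x hx => List.rel_of_pairwise_cons hpw hx
    set L := col.length with hL
    set p := v - cnt with hp
    show pvDelColA (col.eraseIdx p) vs (cnt+1) = _
    rw [ih (col.eraseIdx p) (cnt+1) hpw.of_cons (fun x hx => by
      obtain ⟨h1, h2⟩ := hbnd x (by simp [hx])
      have := hvlt x hx
      constructor
      · omega
      · rw [List.length_eraseIdx_of_lt (by omega)]; omega)]
    rw [List.length_eraseIdx_of_lt (by omega)]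
    -- split both ranges at p
    have hsplitL : List.range (L - 1) = List.range p ++ List.range' p (L - 1 - p) := by
      rw [List.range_eq_range', List.range_eq_range',
        show (List.range' p (L - 1 - p) : List Nat) = List.range' (0 + 1 * p) (L - 1 - p) by simp,
        List.range'_append]
      congr 1; omega
    have hsplitR : List.range L = List.range p ++ (p :: List.range' (p+1) (L - 1 - p)) := by
      rw [List.range_eq_range', List.range_eq_range',
        show ((p : Nat) :: List.range' (p+1) (L - 1 - p)) = List.range' (0 + 1 * p) (L - 1 - p + 1) by
          rw [List.range'_succ]; norm_num,
        List.range'_append]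
      congr 1; omega
    rw [hsplitL, hsplitR, List.filter_append, List.filter_append, List.map_append, List.map_append]
    congr 1
    -- front segments agree
    · rw [List.filter_eq_self.mpr (fun x hx => by
        have hxp := List.mem_range.mp hx
        simp only [decide_eq_true_eq]
        intro hmem
        have := hvlt _ hmem; omega)]
      rw [List.filter_eq_self.mpr (fun x hx => by
        have hxp := List.mem_range.mp hx
        simp only [decide_eq_true_eq, List.mem_cons]
        intro hmem
        rcases hmem with h | h
        · omega
        · have := hvlt _ h; omega)]
      apply List.map_congr_left
      intro x hx
      rw [pvEraseIdx_getD col p x (by omega), if_pos (List.mem_range.mp hx)]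
    -- tail segments agree
    · rw [List.filter_cons, if_neg (by
        simp only [decide_eq_true_eq, Decidable.not_not, List.mem_cons]
        exact Or.inl (by omega))]
      rw [List.range'_eq_map_range, List.range'_eq_map_range]
      rw [List.filter_map, List.filter_map, List.map_map, List.map_map]
      rw [List.filter_congr (fun x _ => by
        show decide (¬ ((p + x) + (cnt + 1)) ∈ vs) = decide (¬ ((p + 1 + x) + cnt) ∈ v :: vs)
        have he : (p + x) + (cnt + 1) = (p + 1 + x) + cnt := by omega
        rw [he]
        simp only [List.mem_cons, decide_eq_decide]
        constructor
        · intro hn hc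
          rcases hc with h | h
          · omega
          · exact hn h
        · intro hn hc; exact hn (Or.inr hc))]
      apply List.map_congr_left
      intro x hx
      show (col.eraseIdx p).getD (p + x) pvEmptyB = col.getD (p + 1 + x) pvEmptyB
      rw [pvEraseIdx_getD col p (p + x) (by omega), if_neg (by omega)]
      congr 1
      omega

-- ---- per-column gravity facts ----
theorem pvFilter_mem_len (s : PySem.Set Nat) (L : Nat) (hnd : s.Nodup)
    (hb : ∀ x ∈ s, x < L) :
    ((List.range L).filter (fun r => decide (r ∈ s))).length = s.length := by
  apply List.Perm.length_eq
  rw [List.perm_ext_iff_of_nodup (List.Nodup.filter _ List.nodup_range) hnd]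
  intro a
  simp only [List.mem_filter, List.mem_range, decide_eq_true_eq]
  exact ⟨fun h => h.2, fun h => ⟨hb a h, h⟩⟩

theorem pvFilterOut_length (col : List Char) (s : PySem.Set Nat) (hnd : s.Nodup)
    (hb : ∀ x ∈ s, x < col.length) :
    (pvFilterOut col s).length = col.length - s.length := by
  unfold pvFilterOut
  rw [List.length_map]
  have h1 := List.length_eq_length_filter_add (l := List.range col.length)
    (fun r => decide (r ∈ s))
  have h2 := pvFilter_mem_len s col.length hnd hb
  have h3 : (List.filter (fun x => !decide (x ∈ s)) (List.range col.length)) =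
      (List.filter (fun r => decide (¬ r ∈ s)) (List.range col.length)) := by
    apply List.filter_congr
    intro x _
    simp
  rw [List.length_range] at h1
  rw [← h3]
  omega

theorem pvSetLen_le (s : PySem.Set Nat) (L : Nat) (hnd : s.Nodup) (hb : ∀ x ∈ s, x < L) :
    s.length ≤ L := by
  have := pvFilter_mem_len s L hnd hb
  have := List.length_filter_le (fun r => decide (r ∈ s)) (List.range L)
  rw [List.length_range] at this
  omega

theorem pvSurvB_pad (m : Nat) (col : List Char) (s : PySem.Set Nat)
    (hb : ∀ x ∈ s, x < col.length) (hlen : col.length ≤ m) (hE : pvEmptyB ∉ col) :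
    pvSurvB (pvPad m col) s m = pvFilterOut col s ++ List.replicate (m - col.length) pvEmptyB := by
  rw [pvSurvB_eq_filter]
  set L := col.length with hL
  have hsplit : List.range m = List.range L ++ List.range' L (m - L) := by
    rw [List.range_eq_range', List.range_eq_range',
      show (List.range' L (m - L) : List Nat) = List.range' (0 + 1 * L) (m - L) by simp,
      List.range'_append]
    congr 1; omega
  rw [hsplit, List.filter_append, List.map_append]
  congr 1
  · unfold pvFilterOut
    apply List.map_congr_left
    intro x _
    rw [pvPad_getD]
  · rw [List.filter_eq_self.mpr (fun x hx => by
      simp only [decide_eq_true_eq]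
      intro hmem
      have := hb x hmem
      rcases List.mem_range'.mp hx with ⟨t, ht, rfl⟩
      omega)]
    have : ∀ x ∈ List.range' L (m - L), (pvPad m col).getD x pvEmptyB = pvEmptyB := by
      intro x hx
      rcases List.mem_range'.mp hx with ⟨t, ht, rfl⟩
      rw [pvPad_getD, pvGetD_out _ _ _ (by omega)]
    rw [List.map_congr_left this, List.map_const', List.length_range']

-- the B-side column rebuild equals the padded A-side column rebuild
theorem pvNewColB (m : Nat) (col : List Char) (s : PySem.Set Nat)
    (hb : ∀ x ∈ s, x < col.length) (hnd : s.Nodup) (hlen : col.length ≤ m) (hE : pvEmptyB ∉ col) :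
    pvSurvB (pvPad m col) s m ++
      List.replicate (m - (pvSurvB (pvPad m col) s m).length) pvEmptyB =
      pvPad m (pvFilterOut col s) := by
  rw [pvSurvB_pad m col s hb hlen hE]
  have hsl := pvSetLen_le s col.length hnd hb
  have hfl := pvFilterOut_length col s hnd hb
  rw [List.append_assoc, ← List.replicate_add]
  unfold pvPad
  congr 2
  · simp [List.length_replicate, hfl]
    omega

theorem pvSurvB_len (m : Nat) (col : List Char) (s : PySem.Set Nat)
    (hb : ∀ x ∈ s, x < col.length) (hnd : s.Nodup) (hlen : col.length ≤ m) (hE : pvEmptyB ∉ col) :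
    (pvSurvB (pvPad m col) s m).length = m - s.length := by
  rw [pvSurvB_pad m col s hb hlen hE]
  have hsl := pvSetLen_le s col.length hnd hb
  have hfl := pvFilterOut_length col s hnd hb
  simp [hfl]
  omega

-- A's offset deletion of the sorted marked set is exactly index filtering
theorem pvDelColA_filterOut (col : List Char) (s : PySem.Set Nat)
    (hb : ∀ x ∈ s, x < col.length) (hnd : s.Nodup) :
    pvDelColA col (PySem.List.sorted s (fun x => x) false) 0 = pvFilterOut col s := by
  have hperm := PySem.List.sorted_perm s (fun x => x) false
  have hnd' : (PySem.List.sorted s (fun x => x) false).Nodup := hperm.nodup_iff.mpr hnd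
  have hpw : (PySem.List.sorted s (fun x => x) false).Pairwise (· < ·) := by
    have hle := PySem.List.sorted_pairwise s (fun x => x)
    have := List.Pairwise.and hle (List.Pairwise.imp (fun h => h) hnd')
    exact this.imp (fun ⟨h1, h2⟩ => lt_of_le_of_ne h1 h2)
  rw [pvDelColA_eq _ col 0 hpw (fun x hx => by
    have hxs : x ∈ s := (PySem.List.mem_sorted s _ false x).mp hx
    exact ⟨Nat.zero_le x, by simpa using hb x hxs⟩)]
  unfold pvFilterOut
  congr 1
  apply List.filter_congr
  intro x _
  simp only [Nat.add_zero, decide_eq_decide]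
  rw [PySem.List.mem_sorted]

-- ---- modify as set, getD of set ----
theorem pvModify_eq_set (q : List (List Char)) (k : Nat) (g : List Char → List Char)
    (hk : k < q.length) :
    q.modify k g = q.set k (g (q.getD k [])) := by
  rw [List.modify_eq_set_get g hk]
  congr 1
  simp [List.getD_eq_getElem?_getD, List.getElem?_eq_getElem hk]

theorem pvGetD_set_ne {α : Type} (l : List α) (k t : Nat) (x d : α) (h : t ≠ k) :
    (l.set k x).getD t d = l.getD t d := by
  simp only [List.getD_eq_getElem?_getD, List.getElem?_set]
  rw [if_neg (fun hh => h hh.symm)]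

-- ---- the gravity loop: B's rebuild of all columns = pad of A's deletions ----
theorem pvGravB_eq (m : Nat) (marked : List (PySem.Set Nat)) :
    ∀ (vs : List (PySem.Set Nat)) (k : Nat) (q : List (List Char)) (sc : Int),
    (∀ t, t < vs.length → marked.getD (k+t) [] = vs.getD t []) →
    k + vs.length = q.length →
    (∀ col ∈ q, col.length ≤ m ∧ pvEmptyB ∉ col) →
    (∀ t, t < vs.length → (∀ x ∈ vs.getD t [], x < (q.getD (k+t) []).length) ∧ (vs.getD t []).Nodup) →
    pvGravB marked m (List.range' k vs.length) (q.map (pvPad m), sc)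
      = ((pvRemoveA q k vs).map (pvPad m), sc + ((vs.map (fun v => (v.length : Int))).sum)) := by
  intro vs
  induction vs with
  | nil =>
    intro k q sc _ _ _ _
    show (q.map (pvPad m), sc) = _
    simp [pvRemoveA]
  | cons v vs ih =>
    intro k q sc hvs hlen hq hbnd
    have hkq : k < q.length := by simp at hlen; omega
    have hcol : q.getD k [] ∈ q := pvGetD_mem q k [] hkq
    obtain ⟨hclen, hcE⟩ := hq _ hcol
    have hv : marked.getD k [] = v := by
      have := hvs 0 (by simp)
      simpa using this
    obtain ⟨hvb, hvnd⟩ := by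
      have := hbnd 0 (by simp)
      simpa using this
    show pvGravB marked m (List.range' k (vs.length + 1)) _ = _
    rw [List.range'_succ]
    show pvGravB marked m (List.range' (k+1) vs.length) _ = _
    -- the state after processing column k
    have hget : (q.map (pvPad m)).getD k [] = pvPad m (q.getD k []) := pvGetD_map_pad m q k hkq
    rw [hget, hv]
    set col := q.getD k [] with hcoldef
    set surv := pvSurvB (pvPad m col) v m with hsurv
    have hnewcol : surv ++ List.replicate (m - surv.length) pvEmptyB =
        pvPad m (pvFilterOut col v) := pvNewColB m col v hvb hvnd hclen hcE
    have hsl : surv.length = m - v.length := pvSurvB_len m col v hvb hvnd hclen hcE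
    have hvle : v.length ≤ col.length := pvSetLen_le v col.length hvnd hvb
    have hsetmap : (q.map (pvPad m)).set k (pvPad m (pvFilterOut col v)) =
        (q.set k (pvFilterOut col v)).map (pvPad m) := (List.map_set).symm
    rw [hnewcol, hsetmap]
    -- A's step
    have hAstep : pvRemoveA q k (v :: vs) =
        pvRemoveA (q.set k (pvFilterOut col v)) (k+1) vs := by
      show pvRemoveA (q.modify k _) (k+1) vs = _
      rw [pvModify_eq_set q k _ hkq, ← hcoldef, pvDelColA_filterOut col v hvb hvnd]
    rw [hAstep]
    -- score bookkeeping
    have hscore : sc + ((m : Int) - (surv.length : Int)) = sc + (v.length : Int) := by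
      rw [hsl]
      have : v.length ≤ m := by omega
      push_cast [Nat.cast_sub this]
      ring
    rw [hscore]
    -- apply the induction hypothesis
    rw [ih (k+1) (q.set k (pvFilterOut col v)) (sc + (v.length : Int))
      (fun t ht => by
        have := hvs (t+1) (by simp; omega)
        rw [show k + (t+1) = k+1+t by omega] at this
        simpa using this)
      (by simp at hlen ⊢; omega)
      (fun c hc => by
        rcases List.mem_or_eq_of_mem_set hc with h | h
        · exact hq c h
        · subst h
          constructor
          · have h1 : (pvFilterOut col v).length ≤ col.length := by
              unfold pvFilterOut
              rw [List.length_map]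
              have := List.length_filter_le (fun r => decide (¬ r ∈ v)) (List.range col.length)
              simpa using this
            omega
          · intro hmem
            unfold pvFilterOut at hmem
            rcases List.mem_map.mp hmem with ⟨r, hr, hrE⟩
            have hrL : r < col.length := List.mem_range.mp (List.mem_filter.mp hr).1
            exact hcE (hrE ▸ pvGetD_mem col r pvEmptyB hrL))
      (fun t ht => by
        have := hbnd (t+1) (by simp; omega)
        rw [show k + (t+1) = k+1+t by omega] at this
        rw [pvGetD_set_ne q k (k+1+t) _ [] (by omega)]
        simpa using this)]
    rw [List.map_cons, List.sum_cons]
    congr 1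
    ring

-- ---- invariants of A's removal phase ----
theorem pvRemoveA_length : ∀ (vs : List (PySem.Set Nat)) (k : Nat) (q : List (List Char)),
    (pvRemoveA q k vs).length = q.length := by
  intro vs
  induction vs with
  | nil => intro k q; rfl
  | cons v vs ih =>
    intro k q
    show (pvRemoveA (q.modify k _) (k+1) vs).length = _
    rw [ih, List.length_modify]

theorem pvRemoveA_inv (m : Nat) : ∀ (vs : List (PySem.Set Nat)) (k : Nat) (q : List (List Char)),
    k + vs.length = q.length →
    (∀ col ∈ q, col.length ≤ m ∧ pvEmptyB ∉ col) →
    (∀ t, t < vs.length → (∀ x ∈ vs.getD t [], x < (q.getD (k+t) []).length) ∧ (vs.getD t []).Nodup) →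
    ∀ col ∈ pvRemoveA q k vs, col.length ≤ m ∧ pvEmptyB ∉ col := by
  intro vs
  induction vs with
  | nil => intro k q _ hq _; exact hq
  | cons v vs ih =>
    intro k q hlen hq hbnd
    have hkq : k < q.length := by simp at hlen; omega
    obtain ⟨hclen, hcE⟩ := hq _ (pvGetD_mem q k [] hkq)
    obtain ⟨hvb, hvnd⟩ := by
      have := hbnd 0 (by simp)
      simpa using this
    show ∀ col ∈ pvRemoveA (q.modify k _) (k+1) vs, _
    rw [pvModify_eq_set q k _ hkq, pvDelColA_filterOut (q.getD k []) v hvb hvnd]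
    apply ih (k+1)
    · simp at hlen ⊢; omega
    · intro c hc
      rcases List.mem_or_eq_of_mem_set hc with h | h
      · exact hq c h
      · subst h
        constructor
        · have h1 : (pvFilterOut (q.getD k []) v).length ≤ (q.getD k []).length := by
            unfold pvFilterOut
            rw [List.length_map]
            have := List.length_filter_le (fun r => decide (¬ r ∈ v)) (List.range (q.getD k []).length)
            simpa using this
          omega
        · intro hmem
          unfold pvFilterOut at hmem
          rcases List.mem_map.mp hmem with ⟨r, hr, hrE⟩
          have hrL : r < (q.getD k []).length := List.mem_range.mp (List.mem_filter.mp hr).1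
          exact hcE (hrE ▸ pvGetD_mem _ r pvEmptyB hrL)
    · intro t ht
      have := hbnd (t+1) (by simp; omega)
      rw [show k + (t+1) = k+1+t by omega] at this
      rw [pvGetD_set_ne q k (k+1+t) _ [] (by omega)]
      simpa using this

-- ---- the main loop, round by round ----
theorem pvLoop_eq (m n : Nat) : ∀ (fuel : Nat) (q : List (List Char)) (score : Int),
    pvInv m n q → pvLoopA q score fuel = pvLoopB m n (q.map (pvPad m)) score fuel := by
  intro fuel
  induction fuel with
  | zero => intro q score _; rfl
  | succ fuel ih =>
    intro q score hInv
    obtain ⟨hn, hq⟩ := hInv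
    have hscan : pvScanIA q (List.range (q.length - 1))
        (List.replicate q.length PySem.Set.empty, false) =
        pvScanF (q.map (pvPad m)) m n (List.replicate n PySem.Set.empty, false) := by
      rw [hn]
      exact pvScanIA_eq m q hq (List.range (n-1)) _
        (fun i hi => by have := List.mem_range.mp hi; omega)
    have hinv := pvScanF_inv m n q hn
    obtain ⟨hlenF, hfalse, htrue, hbnd⟩ := hinv
    have hfst : (pvScanF (q.map (pvPad m)) m n (List.replicate n PySem.Set.empty, false)).1 =
        pvMarkB (q.map (pvPad m)) m n := by
      rw [pvMarkB_eq_fold]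
      unfold pvScanF
      rw [pvFold2_fst]
    have hA : pvLoopA q score (fuel+1) =
        (if (pvScanIA q (List.range (q.length - 1))
              (List.replicate q.length PySem.Set.empty, false)).2 = false then score
         else pvLoopA
            (pvRemoveA q 0 (pvScanIA q (List.range (q.length - 1))
              (List.replicate q.length PySem.Set.empty, false)).1)
            ((pvScanIA q (List.range (q.length - 1))
              (List.replicate q.length PySem.Set.empty, false)).1.foldl
              (fun s v => s + (v.length : Int)) score) fuel) := rfl
    have hB : pvLoopB m n (q.map (pvPad m)) score (fuel+1) =
        (if (pvMarkB (q.map (pvPad m)) m n).any (fun s => !s.isEmpty) = false then score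
         else pvLoopB m n
            (pvGravB (pvMarkB (q.map (pvPad m)) m n) m (List.range n) (q.map (pvPad m), score)).1
            (pvGravB (pvMarkB (q.map (pvPad m)) m n) m (List.range n) (q.map (pvPad m), score)).2
            fuel) := rfl
    rw [hA, hB]
    simp only [hscan]
    set F := pvScanF (q.map (pvPad m)) m n (List.replicate n PySem.Set.empty, false) with hF
    cases hflag : F.2 with
    | false =>
      have hRempty : F.1 = List.replicate n PySem.Set.empty := hfalse hflag
      have hany : (pvMarkB (q.map (pvPad m)) m n).any (fun s => !s.isEmpty) = false := by
        rw [← hfst, hRempty]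
        simp [PySem.Set.empty]
      simp only [hflag, hany]
      simp
    | true =>
      obtain ⟨k, hk, hne⟩ := htrue hflag
      have hany : (pvMarkB (q.map (pvPad m)) m n).any (fun s => !s.isEmpty) = true := by
        rw [← hfst]
        rw [List.any_eq_true]
        refine ⟨F.1.getD k [], pvGetD_mem _ k [] (by omega), by
          simpa [List.isEmpty_iff] using hne⟩
      simp only [hflag, hany]
      simp only [Bool.true_eq_false, if_false]
      have hgrav : pvGravB (pvMarkB (q.map (pvPad m)) m n) m (List.range n)
          (q.map (pvPad m), score) =
          ((pvRemoveA q 0 F.1).map (pvPad m), score + ((F.1.map (fun v => (v.length : Int))).sum)) := by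
        rw [List.range_eq_range', ← hfst]
        rw [show (List.range' 0 n : List Nat) = List.range' 0 F.1.length by rw [hlenF]]
        apply pvGravB_eq m F.1 F.1 0 q score
        · intro t _; simp
        · omega
        · exact hq
        · intro t _
          have := hbnd t
          simpa using this
      rw [hgrav]
      rw [PySem.List.foldl_add]
      apply ih
      refine ⟨by rw [pvRemoveA_length]; exact hn, ?_⟩
      apply pvRemoveA_inv m F.1 0 q (by omega) hq
      intro t _
      have := hbnd t
      simpa using this

-- ---- initialisation ----
theorem pvFoldl_cons_rev (f : Nat → Char) : ∀ (l : List Nat) (acc : List Char),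
    l.foldl (fun t j => f j :: t) acc = (l.map f).reverse ++ acc := by
  intro l
  induction l with
  | nil => intro acc; rfl
  | cons x xs ih =>
    intro acc
    rw [List.foldl_cons, ih, List.map_cons, List.reverse_cons, List.append_assoc]
    rfl

theorem pvColA_eq (board : List String) (m i : Nat) :
    pvColA board m i = (List.range m).map (fun r => pvCellA board (m-1-r) i) := by
  unfold pvColA
  rw [pvFoldl_cons_rev, List.append_nil]
  apply List.ext_getElem
  · simp
  · intro t h1 h2
    rw [List.getElem_reverse]
    simp only [List.length_map, List.length_range, List.getElem_map, List.getElem_range]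

theorem pvInitA_eq (board : List String) (m n : Nat) :
    pvInitA board m n = (List.range n).map (fun i => pvColA board m i) := by
  unfold pvInitA
  rw [PySem.List.foldl_append_singleton_eq_map]
  rfl

theorem pvInitB_eq_pad (board : List String) (m n : Nat) :
    pvInitB board m n = (pvInitA board m n).map (pvPad m) := by
  rw [pvInitA_eq, List.map_map]
  unfold pvInitB
  apply List.map_congr_left
  intro i _
  show (List.range m).map (fun r => ((board.getD (m - 1 - r) "").toList).getD i pvEmptyB) =
    pvPad m (pvColA board m i)
  have hlen : (pvColA board m i).length = m := by rw [pvColA_eq]; simp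
  unfold pvPad
  rw [hlen, Nat.sub_self, List.replicate_zero, List.append_nil, pvColA_eq]
  rfl

theorem pvInitA_inv (m n : Int) (board : List String)
    (hdom : Dom_solution m n board) (hpre : Pre_solution m n board) :
    pvInv m.toNat n.toNat (pvInitA board m.toNat n.toNat) := by
  constructor
  · rw [pvInitA_eq]; simp
  · intro col hcol
    rw [pvInitA_eq] at hcol
    rcases List.mem_map.mp hcol with ⟨i, hi, rfl⟩
    have hiN := List.mem_range.mp hi
    constructor
    · rw [pvColA_eq]; simp
    · intro hmem
      rw [pvColA_eq] at hmem
      rcases List.mem_map.mp hmem with ⟨r, hr, hcell⟩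
      have hrN := List.mem_range.mp hr
      -- so m.toNat > 0 and n.toNat > 0; Pre_ applies
      obtain ⟨hmb, hrows⟩ := hpre ⟨by omega, by omega⟩
      set j := m.toNat - 1 - r with hj
      have hjlt : j < m.toNat := by omega
      have hjb : j < board.length := by omega
      have hrow : board.getD j "" = board[j] := by
        simp [List.getD_eq_getElem?_getD, List.getElem?_eq_getElem hjb]
      have htake : board[j] ∈ board.take m.toNat := by
        have hjt : j < (board.take m.toNat).length := by simp; omega
        have := List.getElem_mem hjt
        simpa [List.getElem_take] using this
      have hncol : (n : Int) ≤ ((board[j]).toList.length : Int) := hrows _ htake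
      have hilt : i < (board[j]).toList.length := by omega
      -- the character is a domain character, hence not NUL
      have hchar : pvDomChar ((board[j]).toList[i]) = true := by
        have hb : pvDomStr (board[j]) = true := by
          unfold Dom_solution at hdom
          simp only [Bool.and_eq_true, List.all_eq_true] at hdom
          exact hdom.2 _ (List.getElem_mem hjb)
        unfold pvDomStr at hb
        rw [List.all_eq_true] at hb
        exact hb _ (List.getElem_mem hilt)
      have hcellval : pvCellA board j i = (board[j]).toList[i] := by
        unfold pvCellA
        rw [hrow]
        simp [List.getD_eq_getElem?_getD, List.getElem?_eq_getElem hilt]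
      rw [hcellval] at hcell
      have : pvEmptyB.toNat = 0 := by decide
      unfold pvDomChar at hchar
      simp only [Bool.or_eq_true, Bool.and_eq_true, decide_eq_true_eq, beq_iff_eq] at hchar
      have hne : ((board[j]).toList[i]).toNat ≠ 0 := by omega
      exact hne (hcell ▸ this)

-- ===== VERDICT (by name: the statement is the Claim_ definition above) =====
theorem solution_spec : Claim_equal_solution := by
  intro m n board hdom hpre
  unfold Spec_solution
  unfold solution solution_alt
  rw [pvInitB_eq_pad]
  exact pvLoop_eq m.toNat n.toNat (m.toNat * n.toNat + 1)
    (pvInitA board m.toNat n.toNat) 0 (pvInitA_inv m n board hdom hpre)
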